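-- pv_equiv track=rewrite | github.com/3veryDay/Growing | Coding_Test_Python/ProgrammersLv2/n^2배열자르기.py | solution
-- ===== SOURCE A (Python) =====
-- def solution(n, left, right):
--
--     arr = []
--
--     for i in range(1, (n+1)) :
--         for I in range(i) :
--             arr.append(i)
--         tmp = i + 1
--         while len(arr) % n != 0 :
--             arr.append(tmp)
--             tmp += 1
--     return arr[left:right + 1]
-- ===== SOURCE B (Python) =====
-- def solution(n, left, right):
--     # value at flat index k of the n*n array is max(k // n, k % n) + 1;
--     # slice(...).indices reproduces Python's slicing bounds without building the array
--     size = n * n if n > 0 else 0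
--     start, stop, _ = slice(left, right + 1).indices(size)
--     return [max(k // n, k % n) + 1 for k in range(start, stop)]
-- ===== Notes on version B (the rewrite author's own statement) =====
-- stated objective: faster
-- what changed: B replaces A's O(n^2) construction of the whole flattened array (nested append loops plus a padding while-loop) by the closed form value(k)=max(k//n,k%n)+1 evaluated only at the sliced indices, computed via slice.indices.
import Mathlib
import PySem

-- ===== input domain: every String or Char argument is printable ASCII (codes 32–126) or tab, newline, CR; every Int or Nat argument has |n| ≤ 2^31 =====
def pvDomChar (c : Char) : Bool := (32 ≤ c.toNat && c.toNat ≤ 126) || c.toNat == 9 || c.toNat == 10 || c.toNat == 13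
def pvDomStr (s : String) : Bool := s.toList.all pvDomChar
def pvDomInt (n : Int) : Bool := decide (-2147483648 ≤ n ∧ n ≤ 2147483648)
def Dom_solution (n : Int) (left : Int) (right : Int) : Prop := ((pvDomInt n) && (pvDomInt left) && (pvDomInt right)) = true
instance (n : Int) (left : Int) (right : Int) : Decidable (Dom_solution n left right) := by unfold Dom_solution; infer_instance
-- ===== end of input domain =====

-- B computes each sliced entry by the closed form max(k//n, k%n)+1 at the clamped slice
-- bounds instead of building the whole n*n array and slicing it; equivalence proved on all inputs.

-- ===== PORT A =====
-- A's inner while-loop: 'while len(arr) % n != 0: arr.append(tmp); tmp += 1'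
-- (fuel n.toNat is only a totality guard; the loop body runs at most n-1 times)
def pvPad (n : Int) : Nat → List Int → Int → List Int
  | 0, arr, _ => arr
  | fuel + 1, arr, tmp =>
    if PySem.Int.mod (PySem.List.len arr) n ≠ 0 then
      pvPad n fuel (arr ++ [tmp]) (tmp + 1)
    else arr

-- body of A's outer 'for i in range(1, n+1)' loop
def pvRow (n : Int) (arr : List Int) (i : Int) : List Int :=
  pvPad n n.toNat ((PySem.List.pyRange 0 i 1).foldl (fun a _I => a ++ [i]) arr) (i + 1)

def solution (n : Int) (left : Int) (right : Int) : List Int :=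
  let arr := (PySem.List.pyRange 1 (n + 1) 1).foldl (pvRow n) []
  PySem.List.slice arr (some left) (some (right + 1))

-- ===== PORT B =====
-- Python's slice(a, b).indices(size) bound computation for step 1
def pvClamp (size : Int) (i : Int) : Int :=
  if i < 0 then max (size + i) 0 else min i size

-- the value at flat index k of the n×n array
def pvVal (n : Int) (k : Int) : Int :=
  max (PySem.Int.floordiv k n) (PySem.Int.mod k n) + 1

def solution_alt (n : Int) (left : Int) (right : Int) : List Int :=
  let size := if 0 < n then n * n else 0
  let start := pvClamp size left
  let stop := pvClamp size (right + 1)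
  (PySem.List.pyRange start stop 1).map (pvVal n)

-- ===== PRECONDITION & SPEC =====
def Spec_solution (n : Int) (left : Int) (right : Int) (out : List Int) : Prop := out = solution_alt n left right
instance (n : Int) (left : Int) (right : Int) (out : List Int) : Decidable (Spec_solution n left right out) := by unfold Spec_solution; infer_instance

-- ===== CLAIM (what is proved, stated in full; the proofs are below) =====
def Claim_equal_solution : Prop := ∀ (n : Int) (left : Int) (right : Int), Dom_solution n left right → Spec_solution n left right (solution n left right)

-- ===== LEMMAS AND PROOFS =====

-- the padding loop: if d more appends reach a multiple of n, it appends exactly tmp, …, tmp+d-1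
lemma pvPad_spec (n : Int) (d : Nat) :
    ∀ (fuel : Nat) (arr : List Int) (tmp : Int), d ≤ fuel → (d : Int) < n →
    n ∣ ((arr.length : Int) + d) →
    pvPad n fuel arr tmp = arr ++ PySem.List.pyRange tmp (tmp + d) 1 := by
  induction d with
  | zero =>
    intro fuel arr tmp _ _ hdvd
    rw [PySem.List.pyRange_one_eq_nil (by omega), List.append_nil]
    have hz : PySem.Int.mod ((arr.length : Int)) n = 0 := by
      rw [PySem.Int.mod_eq_zero_iff_dvd]
      simpa using hdvd
    cases fuel with
    | zero => rfl
    | succ f => simp [pvPad, hz]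
  | succ d ih =>
    intro fuel arr tmp hf hd hdvd
    cases fuel with
    | zero => omega
    | succ f =>
      push_cast at hdvd hd
      have hnz : PySem.Int.mod (PySem.List.len arr) n ≠ 0 := by
        rw [Ne, PySem.Int.mod_eq_zero_iff_dvd, PySem.List.len_eq]
        intro hcon
        have h1 : n ∣ ((d : Int) + 1) := by
          have := dvd_sub hdvd hcon
          simpa using this
        have := Int.le_of_dvd (by omega) h1
        omega
      rw [pvPad, if_pos hnz, ih f (arr ++ [tmp]) (tmp + 1) (by omega) (by omega)
        (by simp; convert hdvd using 1; ring)]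
      rw [List.append_assoc]
      congr 1
      have hc : PySem.List.pyRange tmp (tmp + ((d:Int)+1)) 1
          = tmp :: PySem.List.pyRange (tmp+1) (tmp + ((d:Int)+1)) 1 :=
        PySem.List.pyRange_one_cons (by omega)
      push_cast
      rw [hc]
      simp
      congr 1
      ring

-- the inner 'for I in range(i)' loop appends i copies of i
lemma pvInner (l : List Int) (arr : List Int) (i : Int) :
    l.foldl (fun a _I => a ++ [i]) arr = arr ++ List.replicate l.length i := by
  induction l generalizing arr with
  | nil => simp
  | cons x xs ih => simp [List.foldl_cons, ih, List.replicate_succ]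

lemma pvMap_add_one_pyRange (a b : Int) :
    (PySem.List.pyRange a b 1).map (fun c => c + 1) = PySem.List.pyRange (a + 1) (b + 1) 1 := by
  simp [PySem.List.pyRange_one]
  intro k _; ring

-- closed form of one row (0-indexed row m): m+1 copies of m+1 then m+2, …, n
lemma pvRowVals (n : Int) (m : Nat) (hm : (m : Int) < n) :
    (PySem.List.pyRange 0 n 1).map (fun c => max (m : Int) c + 1)
      = List.replicate (m + 1) ((m : Int) + 1) ++ PySem.List.pyRange ((m : Int) + 2) (n + 1) 1 := by
  rw [PySem.List.pyRange_one_append 0 ((m : Int) + 1) n (by omega) (by omega), List.map_append]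
  congr 1
  · rw [List.map_congr_left (g := fun _ => (m : Int) + 1)
      (fun c hc => by
        have := (PySem.List.mem_pyRange_one).1 hc
        have : max (m : Int) c = m := by omega
        simp [this])]
    rw [List.map_const']
    rw [PySem.List.length_pyRange_one, show ((m:Int) + 1 - 0).toNat = m + 1 by omega]
  · rw [List.map_congr_left (g := fun c => c + 1)
      (fun c hc => by
        have := (PySem.List.mem_pyRange_one).1 hc
        have : max (m : Int) c = c := by omega
        simp [this])]
    rw [pvMap_add_one_pyRange, show (m:Int) + 1 + 1 = (m:Int) + 2 by ring]

-- the flat-index values on row m are the row values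
lemma pvIdxVals (n : Int) (hn : 0 < n) (m : Nat) :
    (PySem.List.pyRange (n * m) (n * m + n) 1).map (pvVal n)
      = (PySem.List.pyRange 0 n 1).map (fun c => max (m : Int) c + 1) := by
  simp only [PySem.List.pyRange_one, List.map_map]
  rw [show (n * (m : Int) + n - n * (m : Int)).toNat = (n - 0).toNat by omega]
  apply List.map_congr_left
  intro k hk
  simp only [Function.comp_apply]
  have hk' : (k : Int) < n := by
    have := List.mem_range.1 hk
    omega
  have hfd : PySem.Int.floordiv (n * (m : Int) + k) n = m := by
    rw [PySem.Int.floordiv_eq_iff_of_pos hn]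
    constructor <;> nlinarith [Int.natCast_nonneg k, Int.natCast_nonneg m]
  have hmod : PySem.Int.mod (n * (m : Int) + k) n = k := by
    have := PySem.Int.floordiv_mul_add_mod (n * (m : Int) + k) n
    rw [hfd, mul_comm] at this
    omega
  simp [pvVal, hfd, hmod]

-- A's array after the first m outer iterations is the closed form on indices [0, n*m)
lemma pvBuild (n : Int) (hn : 0 < n) (m : Nat) (hm : (m : Int) ≤ n) :
    (PySem.List.pyRange 1 ((m : Int) + 1) 1).foldl (pvRow n) []
      = (PySem.List.pyRange 0 (n * m) 1).map (pvVal n) := by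
  induction m with
  | zero =>
    rw [PySem.List.pyRange_one_eq_nil (by norm_num), PySem.List.pyRange_one_eq_nil (by push_cast; omega)]
    simp
  | succ m ih =>
    have hm' : (m : Int) < n := by push_cast at hm; omega
    rw [show ((m + 1 : Nat) : Int) + 1 = ((m : Int) + 1) + 1 by push_cast; ring,
      PySem.List.pyRange_one_succ_right (by omega : (1:Int) ≤ (m : Int) + 1),
      List.foldl_append, ih (by omega)]
    simp only [List.foldl_cons, List.foldl_nil]
    rw [pvRow, pvInner]
    have hlen : (((PySem.List.pyRange 0 (n * (m : Int)) 1).map (pvVal n)).length : Int) = n * m := by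
      simp [PySem.List.length_pyRange_one]
      nlinarith [Int.natCast_nonneg m]
    rw [PySem.List.length_pyRange_one, show (((m : Int) + 1) - 0).toNat = m + 1 by omega]
    rw [pvPad_spec n (n - (m + 1)).toNat n.toNat _ _ (by omega) (by omega)
      (by
        rw [List.length_append, List.length_replicate]
        push_cast
        rw [hlen, Int.toNat_of_nonneg (by omega)]
        exact ⟨(m:Int)+1, by ring⟩)]
    rw [show n * ((m + 1 : Nat) : Int) = n * (m : Int) + n by push_cast; ring,
      PySem.List.pyRange_one_append 0 (n * (m : Int)) (n * (m : Int) + n)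
        (by nlinarith [Int.natCast_nonneg m]) (by omega),
      List.map_append, pvIdxVals n hn m, pvRowVals n m hm', List.append_assoc]
    rw [show ((m:Int) + 1) + 1 = (m:Int) + 2 from by ring,
      show ((m:Int) + 2 + ((n - ((m:Int)+1)).toNat : Int)) = n + 1 from by omega]

lemma pvDrop_pyRange (s : Nat) : ∀ (a b : Int),
    (PySem.List.pyRange a b 1).drop s = PySem.List.pyRange (a + s) b 1 := by
  induction s with
  | zero => simp
  | succ s ih =>
    intro a b
    rcases lt_or_ge a b with h | h
    · rw [PySem.List.pyRange_one_cons h]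
      simp only [List.drop_succ_cons, ih]
      congr 1; push_cast; ring
    · rw [PySem.List.pyRange_one_eq_nil h, PySem.List.pyRange_one_eq_nil (by omega)]
      simp

lemma pvTake_pyRange (t : Nat) : ∀ (a b : Int),
    (PySem.List.pyRange a b 1).take t = PySem.List.pyRange a (min b (a + t)) 1 := by
  induction t with
  | zero =>
    intro a b
    rw [List.take_zero]
    exact (PySem.List.pyRange_one_eq_nil (by push_cast; omega)).symm
  | succ t ih =>
    intro a b
    rcases lt_or_ge a b with h | h
    · rw [PySem.List.pyRange_one_cons h, List.take_succ_cons, ih,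
        PySem.List.pyRange_one_cons (show a < min b (a + ((t+1:Nat):Int)) by push_cast; omega)]
      congr 2
      push_cast; omega
    · rw [PySem.List.pyRange_one_eq_nil h]
      rw [List.take_nil]
      exact (PySem.List.pyRange_one_eq_nil (by push_cast; omega)).symm

-- B's clamp is Python's slice-index clamp
lemma pvClamp_eq (L a : Int) (hL : 0 ≤ L) :
    pvClamp L a = ((PySem.List.clampIdx L.toNat a : Nat) : Int) := by
  simp [pvClamp, PySem.List.clampIdx]
  split_ifs <;> omega

-- slicing a comprehension over range(0, L) is the comprehension over the clamped index range
lemma pvSlice_map_pyRange (f : Int → Int) (L a b : Int) (hL : 0 ≤ L) :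
    PySem.List.slice ((PySem.List.pyRange 0 L 1).map f) (some a) (some b)
      = (PySem.List.pyRange (pvClamp L a) (pvClamp L b) 1).map f := by
  have hlen : ((PySem.List.pyRange 0 L 1).map f).length = L.toNat := by
    simp [PySem.List.length_pyRange_one]
  simp only [PySem.List.slice, hlen]
  set ca := PySem.List.clampIdx L.toNat a with hca
  set cb := PySem.List.clampIdx L.toNat b with hcb
  have hle_a : ca ≤ L.toNat := PySem.List.clampIdx_le _ _
  have hle_b : cb ≤ L.toNat := PySem.List.clampIdx_le _ _
  rw [← List.map_drop, ← List.map_take, pvDrop_pyRange, pvTake_pyRange,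
    pvClamp_eq L a hL, pvClamp_eq L b hL, ← hca, ← hcb]
  rcases Nat.le_total ca cb with h | h
  · congr 2
    · omega
    · rw [Nat.cast_sub h]
      omega
  · rw [PySem.List.pyRange_one_eq_nil (by omega : min L (0 + (ca:Int) + ((cb - ca : Nat):Int)) ≤ 0 + (ca:Int)),
      PySem.List.pyRange_one_eq_nil (by omega : (cb:Int) ≤ (ca:Int))]

-- ===== VERDICT (by name: the statement is the Claim_ definition above) =====
theorem solution_spec : Claim_equal_solution := by
  intro n left right _
  unfold Spec_solution solution solution_alt
  rcases lt_or_ge 0 n with hn | hn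
  · rw [if_pos hn]
    have hb := pvBuild n hn n.toNat (by rw [Int.toNat_of_nonneg (by omega)])
    rw [Int.toNat_of_nonneg (by omega)] at hb
    rw [hb]
    exact pvSlice_map_pyRange (pvVal n) (n * n) left (right + 1) (by positivity)
  · rw [if_neg (by omega)]
    have h0 : ∀ i, pvClamp 0 i = 0 := by
      intro i; unfold pvClamp; split_ifs <;> omega
    rw [PySem.List.pyRange_one_eq_nil (by omega : n + 1 ≤ 1)]
    show PySem.List.slice (List.foldl (pvRow n) [] []) (some left) (some (right + 1))
        = (PySem.List.pyRange (pvClamp 0 left) (pvClamp 0 (right + 1)) 1).map (pvVal n)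
    rw [h0, h0, PySem.List.pyRange_one_eq_nil (by omega : (0:Int) ≤ 0)]
    simp [PySem.List.slice]
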